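-- pv_equiv track=rewrite | github.com/MatheusDer/move_all_discord | mover_sala_discord.py | permissao
-- ===== SOURCE A (Python) =====
-- def permissao(white_list: list[str], cargos: list[str]) -> bool:
--     count = 0
--     for cargo in white_list:
--         if cargo in cargos:
--             count += 1
--
--     if count != 0:
--         return True
--     return False
-- ===== SOURCE B (Python) =====
-- def permissao(white_list: list[str], cargos: list[str]) -> bool:
--     return bool(set(white_list) & set(cargos))
-- ===== Notes on version B (the rewrite author's own statement) =====
-- stated objective: idiomatic
-- what changed: Replaced the per-element counting loop with whole-collection set intersection (set(white_list) & set(cargos)) coerced to bool; no counter, no explicit loop.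
import Mathlib
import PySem

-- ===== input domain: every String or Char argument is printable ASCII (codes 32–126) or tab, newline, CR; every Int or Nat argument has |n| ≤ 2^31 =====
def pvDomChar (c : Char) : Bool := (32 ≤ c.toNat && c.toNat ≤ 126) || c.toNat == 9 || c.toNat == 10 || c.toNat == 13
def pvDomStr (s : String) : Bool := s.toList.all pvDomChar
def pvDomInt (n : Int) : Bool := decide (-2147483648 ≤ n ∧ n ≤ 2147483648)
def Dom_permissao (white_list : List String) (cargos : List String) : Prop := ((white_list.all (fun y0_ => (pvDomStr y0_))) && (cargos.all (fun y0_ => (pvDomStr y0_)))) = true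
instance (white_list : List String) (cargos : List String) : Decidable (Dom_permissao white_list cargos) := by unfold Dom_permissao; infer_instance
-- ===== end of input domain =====

-- B replaces A's count-and-compare loop over white_list with whole-collection set intersection (idiomatic; no counter).


-- ===== PORT A =====
def permissao (white_list : List String) (cargos : List String) : Bool :=
  let count := white_list.foldl (fun count cargo => if cargo ∈ cargos then count + 1 else count) (0 : Int)
  if count ≠ 0 then true else false

-- ===== PORT B =====
def permissao_alt (white_list : List String) (cargos : List String) : Bool :=
  !(PySem.Set.inter (PySem.Set.ofList white_list) (PySem.Set.ofList cargos)).isEmpty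

-- ===== PRECONDITION & SPEC =====
def Spec_permissao (white_list : List String) (cargos : List String) (out : Bool) : Prop := out = permissao_alt white_list cargos
instance (white_list : List String) (cargos : List String) (out : Bool) : Decidable (Spec_permissao white_list cargos out) := by unfold Spec_permissao; infer_instance

-- ===== CLAIM (what is proved, stated in full; the proofs are below) =====
def Claim_equal_permissao : Prop := ∀ (white_list : List String) (cargos : List String), Dom_permissao white_list cargos → Spec_permissao white_list cargos (permissao white_list cargos)

-- ===== LEMMAS AND PROOFS =====
lemma permissao_count (wl cargos : List String) : ∀ c : Int,
    wl.foldl (fun count cargo => if cargo ∈ cargos then count + 1 else count) c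
      = c + ((wl.filter (· ∈ cargos)).length : Int) := by
  induction wl with
  | nil => intro c; simp
  | cons x xs ih =>
    intro c
    by_cases hx : x ∈ cargos <;> simp [List.foldl_cons, hx, ih] <;> omega


-- ===== VERDICT (by name: the statement is the Claim_ definition above) =====
theorem permissao_spec : Claim_equal_permissao := by
  intro wl cargos _
  unfold Spec_permissao permissao permissao_alt
  show (if List.foldl _ 0 wl ≠ 0 then true else false) = _
  rw [permissao_count]
  simp only [zero_add, ne_eq, Nat.cast_eq_zero, List.length_eq_zero_iff,
    List.filter_eq_nil_iff, decide_eq_true_eq]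
  rcases h : (PySem.Set.inter (PySem.Set.ofList wl) (PySem.Set.ofList cargos)).isEmpty with _ | _
  · -- inter nonempty : some common element
    rw [List.isEmpty_eq_false_iff_exists_mem] at h
    obtain ⟨x, hx⟩ := h
    rw [PySem.Set.mem_inter, PySem.Set.mem_ofList, PySem.Set.mem_ofList] at hx
    simp only [Bool.not_false]
    rw [if_pos]
    intro hall
    exact hall x hx.1 hx.2
  · -- inter empty : no common element
    rw [List.isEmpty_iff] at h
    simp only [Bool.not_true]
    rw [if_neg]
    simp only [not_not]
    intro x hxw hxc
    have : x ∈ PySem.Set.inter (PySem.Set.ofList wl) (PySem.Set.ofList cargos) := by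
      rw [PySem.Set.mem_inter, PySem.Set.mem_ofList, PySem.Set.mem_ofList]; exact ⟨hxw, hxc⟩
    rw [h] at this; cases this
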